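-- pv_equiv track=rewrite | github.com/jeongminllee/ProgrammersCodeTest | 프로그래머스/3/258709. 주사위 고르기/주사위 고르기.py | get_wins_cnt
-- ===== SOURCE A (Python) =====
-- def get_wins_cnt(A, B) :
--     '''
--     :param A: A의 주사위
--     :param B: B의 주사위
--     :return: 모든 주사위 점수의 합에 따른 승리 횟수 반환(이분탐색)
--     '''
--     res = 0
--
--     A.sort()
--     B.sort()
--
--     for a in A :
--         # B 리스트에 대한 a의 lower bound(찾고자 하는 값 이상이 처음 나오는 위치)
--         # = a가 몇 개의 경우의 수를 이기는지 개수
--         start, end = 0, len(B) - 1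
--
--         while start <= end :
--             mid = (start + end) // 2
--             if a > B[mid] :
--                 start = mid + 1
--             else :
--                 end = mid - 1
--
--         res += end
--
--     return res
-- ===== SOURCE B (Python) =====
-- def get_wins_cnt(A, B):
--     # Two-pointer merge over the two sorted lists instead of a per-element
--     # binary search: j never moves backward.  Adds j - 1 per element, which
--     # is exactly the value A's binary search accumulates (its final `end`).
--     A.sort()
--     B.sort()
--     res = 0
--     j = 0
--     for a in A:
--         while j < len(B) and B[j] < a:
--             j += 1
--         res += j - 1
--     return res
-- ===== Notes on version B (the rewrite author's own statement) =====
-- stated objective: faster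
-- what changed: Replaces the per-element binary search over B with a single two-pointer merge: one index j into sorted B that only moves forward across the whole (sorted) iteration of A.
import Mathlib
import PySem

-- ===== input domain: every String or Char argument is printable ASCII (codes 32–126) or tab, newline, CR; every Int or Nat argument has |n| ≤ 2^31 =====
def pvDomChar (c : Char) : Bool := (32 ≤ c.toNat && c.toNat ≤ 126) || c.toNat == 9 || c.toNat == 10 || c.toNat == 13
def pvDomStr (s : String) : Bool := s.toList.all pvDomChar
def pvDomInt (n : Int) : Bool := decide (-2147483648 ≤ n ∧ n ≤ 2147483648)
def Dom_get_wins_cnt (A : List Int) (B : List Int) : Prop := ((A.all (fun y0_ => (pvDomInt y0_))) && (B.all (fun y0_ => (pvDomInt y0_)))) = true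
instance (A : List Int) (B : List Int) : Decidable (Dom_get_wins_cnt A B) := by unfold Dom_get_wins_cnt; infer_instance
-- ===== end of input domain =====

-- B replaces A's per-element binary search with a single forward-only two-pointer
-- merge over the two sorted lists (objective: faster, constant-factor).
-- Both Pythons sort A and B in place; the equivalence proved here is about the
-- RETURN value (both perform the same in-place sorts).

-- ===== PORT A =====
-- the binary-search while loop of A; B[mid] is always in range when the loop body
-- runs (0 ≤ s ≤ mid ≤ e < len B), so pyGetD is exact here
def pvBSearch (B : List Int) (a : Int) (s e : Int) : Int :=
  if h : s ≤ e then
    if a > PySem.List.pyGetD B (PySem.Int.floordiv (s + e) 2) 0 then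
      pvBSearch B a (PySem.Int.floordiv (s + e) 2 + 1) e
    else
      pvBSearch B a s (PySem.Int.floordiv (s + e) 2 - 1)
  else e
termination_by (e + 1 - s).toNat
decreasing_by
  all_goals
    have := PySem.Int.floordiv_two_mid_bounds (lo := s) (hi := e) h
    omega

def get_wins_cnt (A : List Int) (B : List Int) : Int :=
  let A' := PySem.List.sorted A (fun x => x)
  let B' := PySem.List.sorted B (fun x => x)
  A'.foldl (fun res a => res + pvBSearch B' a 0 ((B'.length : Int) - 1)) 0

-- ===== PORT B =====
-- the inner while loop of B: advance j while j < len(B) and B[j] < a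
-- (B[j] only read when 0 ≤ j < len B, so pyGetD is exact here)
def pvAdvance (B : List Int) (a : Int) (j : Int) : Int :=
  if h : j < (B.length : Int) ∧ PySem.List.pyGetD B j 0 < a then
    pvAdvance B a (j + 1)
  else j
termination_by ((B.length : Int) - j).toNat
decreasing_by omega

def get_wins_cnt_alt (A : List Int) (B : List Int) : Int :=
  let A' := PySem.List.sorted A (fun x => x)
  let B' := PySem.List.sorted B (fun x => x)
  (A'.foldl (fun (st : Int × Int) a =>
      let j := pvAdvance B' a st.2
      (st.1 + (j - 1), j)) ((0 : Int), (0 : Int))).1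

-- ===== PRECONDITION & SPEC =====
def Spec_get_wins_cnt (A : List Int) (B : List Int) (out : Int) : Prop := out = get_wins_cnt_alt A B
instance (A : List Int) (B : List Int) (out : Int) : Decidable (Spec_get_wins_cnt A B out) := by unfold Spec_get_wins_cnt; infer_instance

-- ===== CLAIM (what is proved, stated in full; the proofs are below) =====
def Claim_equal_get_wins_cnt : Prop := ∀ (A : List Int) (B : List Int), Dom_get_wins_cnt A B → Spec_get_wins_cnt A B (get_wins_cnt A B)

-- ===== LEMMAS AND PROOFS =====

-- the number of elements of B strictly below a, as an Int
def pvCnt (B : List Int) (a : Int) : Int := (B.countP (fun b => decide (b < a)) : Int)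

-- a sorted list is index-monotone
theorem pvSortedMono (B : List Int) (hB : B.Pairwise (· ≤ ·)) (i j : Nat)
    (hij : i ≤ j) (hj : j < B.length) : B[i]'(by omega) ≤ B[j] := by
  rcases Nat.lt_or_eq_of_le hij with h | h
  · exact (List.pairwise_iff_getElem.mp hB) i j (by omega) hj h
  · subst h; exact le_refl _

-- if a predicate holds exactly on the first k indices, countP is k
theorem pvCountSplit (p : Int → Bool) :
    ∀ (B : List Int) (k : Nat), k ≤ B.length →
    (∀ i (h : i < B.length), i < k → p (B[i]) = true) →
    (∀ i (h : i < B.length), k ≤ i → p (B[i]) = false) →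
    B.countP p = k := by
  intro B
  induction B with
  | nil => intro k hk _ _; simp at hk ⊢; omega
  | cons b t ih =>
    intro k hk h1 h2
    cases k with
    | zero =>
      simp only [List.countP_cons]
      have hb : p b = false := h2 0 (by simp) (by omega)
      have ht : t.countP p = 0 := by
        apply ih 0 (by omega)
        · intro i h hi; omega
        · intro i h _
          exact h2 (i+1) (by simpa using by omega) (by omega)
      simp [hb, ht]
    | succ k' =>
      simp only [List.countP_cons]
      have hb : p b = true := h1 0 (by simp) (by omega)
      have ht : t.countP p = k' := by
        apply ih k' (by simpa using hk)
        · intro i h hi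
          exact h1 (i+1) (by simpa using by omega) (by omega)
        · intro i h hi
          exact h2 (i+1) (by simpa using by omega) (by omega)
      simp [hb, ht]

-- if p is false from index i on, countP ≤ i
theorem pvCountLe (p : Int → Bool) :
    ∀ (B : List Int) (i : Nat),
    (∀ k (hk : k < B.length), i ≤ k → p (B[k]) = false) →
    B.countP p ≤ i := by
  intro B
  induction B with
  | nil => intro i _; simp
  | cons b t ih =>
    intro i h
    cases i with
    | zero =>
      have : (b :: t).countP p = 0 := by
        apply List.countP_eq_zero.mpr
        intro x hx
        rcases List.mem_iff_getElem.mp hx with ⟨k, hk, rfl⟩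
        simp [h k hk (by omega)]
      omega
    | succ i' =>
      simp only [List.countP_cons]
      have ht : t.countP p ≤ i' := by
        apply ih
        intro k hk hki
        exact h (k+1) (by simpa using by omega) (by omega)
      split <;> omega

-- in a sorted list, every index below pvCnt holds an element < a
theorem pvCntPrefix (B : List Int) (a : Int) (hB : B.Pairwise (· ≤ ·))
    (i : Nat) (hi : i < B.length) (hlt : (i : Int) < pvCnt B a) : B[i] < a := by
  by_contra hge
  have hall : ∀ k (hk : k < B.length), i ≤ k → (decide (B[k] < a)) = false := by
    intro k hk hik
    have := pvSortedMono B hB i k hik hk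
    simp; omega
  have := pvCountLe (fun b => decide (b < a)) B i hall
  unfold pvCnt at hlt
  omega

theorem pvCnt_le_len (B : List Int) (a : Int) : pvCnt B a ≤ (B.length : Int) := by
  unfold pvCnt
  exact_mod_cast List.countP_le_length

-- A's binary search returns (count of elements < a) - 1
theorem pvBSearch_eq (B : List Int) (a : Int) (hB : B.Pairwise (· ≤ ·)) :
    ∀ (n : Nat) (s e : Int), (e + 1 - s).toNat ≤ n →
    0 ≤ s → e ≤ (B.length : Int) - 1 → s ≤ e + 1 →
    (∀ i (h : i < B.length), (i : Int) < s → B[i] < a) →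
    (∀ i (h : i < B.length), e < (i : Int) → ¬ B[i] < a) →
    pvBSearch B a s e = pvCnt B a - 1 := by
  intro n
  induction n with
  | zero =>
    intro s e hfuel hs he hse h1 h2
    have hseq : s = e + 1 := by omega
    rw [pvBSearch]
    have hnot : ¬ s ≤ e := by omega
    rw [dif_neg hnot]
    have hc : B.countP (fun b => decide (b < a)) = s.toNat := by
      apply pvCountSplit
      · omega
      · intro i h hi
        simp [h1 i h (by omega)]
      · intro i h hi
        simp
        have := h2 i h (by omega)
        omega
    unfold pvCnt
    omega
  | succ n ih =>
    intro s e hfuel hs he hse h1 h2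
    rw [pvBSearch]
    by_cases hle : s ≤ e
    · have hmid := PySem.Int.floordiv_two_mid_bounds (lo := s) (hi := e) hle
      set mid := PySem.Int.floordiv (s + e) 2 with hmiddef
      have hmid0 : 0 ≤ mid := by omega
      have hmidlen : mid < (B.length : Int) := by omega
      have hget : PySem.List.pyGetD B mid 0 = B[mid.toNat]'(by omega) :=
        PySem.List.pyGetD_eq_getElem (xs := B) (i := mid) (d := 0) hmid0 (by omega)
      rw [dif_pos hle, hget]
      by_cases hcmp : B[mid.toNat]'(by omega) < a
      · rw [if_pos (show a > B[mid.toNat]'(by omega) from hcmp)]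
        apply ih (mid + 1) e (by omega) (by omega) he (by omega)
        · intro i h hi
          by_cases his : (i : Int) < s
          · exact h1 i h his
          · have : B[i] ≤ B[mid.toNat]'(by omega) :=
              pvSortedMono B hB i mid.toNat (by omega) (by omega)
            omega
        · exact h2
      · rw [if_neg (show ¬ a > B[mid.toNat]'(by omega) from hcmp)]
        apply ih s (mid - 1) (by omega) hs (by omega) (by omega) h1
        intro i h hi
        have : B[mid.toNat]'(by omega) ≤ B[i] :=
          pvSortedMono B hB mid.toNat i (by omega) h
        omega
    · rw [dif_neg hle]
      have hc : B.countP (fun b => decide (b < a)) = s.toNat := by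
        apply pvCountSplit
        · omega
        · intro i h hi
          simp [h1 i h (by omega)]
        · intro i h hi
          simp
          have := h2 i h (by omega)
          omega
      unfold pvCnt
      omega

-- B's pointer advance lands exactly on the count of elements < a
theorem pvAdvance_eq (B : List Int) (a : Int) (hB : B.Pairwise (· ≤ ·)) :
    ∀ (n : Nat) (j : Int), ((B.length : Int) - j).toNat ≤ n →
    0 ≤ j → j ≤ (B.length : Int) →
    (∀ i (h : i < B.length), (i : Int) < j → B[i] < a) →
    pvAdvance B a j = pvCnt B a := by
  intro n
  induction n with
  | zero =>
    intro j hfuel hj0 hjlen h1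
    have hjeq : j = (B.length : Int) := by omega
    rw [pvAdvance]
    have hnot : ¬ (j < (B.length : Int) ∧ PySem.List.pyGetD B j 0 < a) := by
      intro ⟨h, _⟩; omega
    rw [dif_neg hnot]
    have hc : B.countP (fun b => decide (b < a)) = B.length := by
      apply pvCountSplit
      · omega
      · intro i h hi; simp [h1 i h (by omega)]
      · intro i h hi; omega
    unfold pvCnt
    omega
  | succ n ih =>
    intro j hfuel hj0 hjlen h1
    rw [pvAdvance]
    by_cases hin : j < (B.length : Int)
    · have hget : PySem.List.pyGetD B j 0 = B[j.toNat]'(by omega) :=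
        PySem.List.pyGetD_eq_getElem (xs := B) (i := j) (d := 0) hj0 (by omega)
      by_cases hcmp : B[j.toNat]'(by omega) < a
      · have hcond : j < (B.length : Int) ∧ PySem.List.pyGetD B j 0 < a :=
          ⟨hin, by rw [hget]; exact hcmp⟩
        rw [dif_pos hcond]
        apply ih (j + 1) (by omega) (by omega) (by omega)
        intro i h hi
        by_cases hij : (i : Int) < j
        · exact h1 i h hij
        · have hieq : i = j.toNat := by omega
          subst hieq; exact hcmp
      · have hcond : ¬ (j < (B.length : Int) ∧ PySem.List.pyGetD B j 0 < a) := by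
          intro ⟨_, hlt⟩; rw [hget] at hlt; exact hcmp hlt
        rw [dif_neg hcond]
        have hc : B.countP (fun b => decide (b < a)) = j.toNat := by
          apply pvCountSplit
          · omega
          · intro i h hi; simp [h1 i h (by omega)]
          · intro i h hi
            have : B[j.toNat]'(by omega) ≤ B[i] :=
              pvSortedMono B hB j.toNat i (by omega) h
            simp; omega
        unfold pvCnt
        omega
    · have hcond : ¬ (j < (B.length : Int) ∧ PySem.List.pyGetD B j 0 < a) := by
        intro ⟨h, _⟩; exact hin h
      rw [dif_neg hcond]
      have hc : B.countP (fun b => decide (b < a)) = B.length := by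
        apply pvCountSplit
        · omega
        · intro i h hi; simp [h1 i h (by omega)]
        · intro i h hi; omega
      unfold pvCnt
      omega

-- the two folds agree, given sorted B and sorted iteration list l
theorem pvFoldEq (B : List Int) (hB : B.Pairwise (· ≤ ·)) :
    ∀ (l : List Int), l.Pairwise (· ≤ ·) →
    ∀ (res j : Int), 0 ≤ j → j ≤ (B.length : Int) →
    (∀ x ∈ l, ∀ i (h : i < B.length), (i : Int) < j → B[i] < x) →
    (l.foldl (fun (st : Int × Int) a =>
        let j' := pvAdvance B a st.2
        (st.1 + (j' - 1), j')) (res, j)).1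
      = l.foldl (fun res a => res + pvBSearch B a 0 ((B.length : Int) - 1)) res := by
  intro l
  induction l with
  | nil => intro _ res j _ _ _; rfl
  | cons a t ih =>
    intro hl res j hj0 hjlen hpre
    simp only [List.foldl_cons]
    have hadv : pvAdvance B a j = pvCnt B a :=
      pvAdvance_eq B a hB (((B.length : Int) - j).toNat) j (le_refl _) hj0 hjlen
        (fun i h hi => hpre a (by simp) i h hi)
    have hbs : pvBSearch B a 0 ((B.length : Int) - 1) = pvCnt B a - 1 := by
      apply pvBSearch_eq B a hB ((B.length : Int)).toNat 0 ((B.length : Int) - 1)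
        (by omega) (by omega) (by omega) (by omega)
      · intro i h hi; omega
      · intro i h hi; omega
    rw [hadv, hbs]
    apply ih (List.Pairwise.sublist (List.sublist_cons_self a t) hl)
      (res + (pvCnt B a - 1)) (pvCnt B a) (by unfold pvCnt; omega)
      (pvCnt_le_len B a)
    intro x hx i h hi
    have h1 : B[i] < a := pvCntPrefix B a hB i h hi
    have h2 : a ≤ x := (List.pairwise_cons.mp hl).1 x hx
    omega

-- ===== VERDICT (by name: the statement is the Claim_ definition above) =====
theorem get_wins_cnt_spec : Claim_equal_get_wins_cnt := by
  intro A B _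
  unfold Spec_get_wins_cnt get_wins_cnt get_wins_cnt_alt
  have hB : (PySem.List.sorted B (fun x => x)).Pairwise (· ≤ ·) := by
    have := PySem.List.sorted_pairwise (xs := B) (key := fun x => x)
    simpa using this
  have hA : (PySem.List.sorted A (fun x => x)).Pairwise (· ≤ ·) := by
    have := PySem.List.sorted_pairwise (xs := A) (key := fun x => x)
    simpa using this
  exact (pvFoldEq (PySem.List.sorted B (fun x => x)) hB
    (PySem.List.sorted A (fun x => x)) hA 0 0 (le_refl _) (by positivity)
    (fun x _ i h hi => by omega)).symm
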